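-- pv_equiv track=rewrite | github.com/shihuiarenjinba-png/simulator | factor_library.py | _collect_numeric_rows
-- ===== SOURCE A (Python) =====
-- def _collect_numeric_rows(lines: list[str], start_idx: int) -> list[list[str]]:
--     rows: list[list[str]] = []
--     for line in lines[start_idx:]:
--         if not line.strip():
--             if rows:
--                 break
--             continue
--         parts = [part.strip() for part in line.split(",")]
--         if not parts or not parts[0].isdigit():
--             if rows:
--                 break
--             continue
--         rows.append(parts)
--     return rows
-- ===== SOURCE B (Python) =====
-- def _collect_numeric_rows(lines: list[str], start_idx: int) -> list[list[str]]:
--     def valid(line: str) -> bool: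
--         return bool(line.strip()) and line.split(",")[0].strip().isdigit()
--
--     tail = lines[start_idx:]
--     i = 0
--     while i < len(tail) and not valid(tail[i]):
--         i += 1
--     j = i
--     while j < len(tail) and valid(tail[j]):
--         j += 1
--     return [[part.strip() for part in line.split(",")] for line in tail[i:j]]
-- ===== Notes on version B (the rewrite author's own statement) =====
-- stated objective: alternative
-- what changed: Replaces the flag-based single-pass loop with break/continue state by a two-phase drop-invalid-then-take-valid decomposition around one shared validity predicate, mapping the captured block to stripped CSV rows at the end.
import Mathlib
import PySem

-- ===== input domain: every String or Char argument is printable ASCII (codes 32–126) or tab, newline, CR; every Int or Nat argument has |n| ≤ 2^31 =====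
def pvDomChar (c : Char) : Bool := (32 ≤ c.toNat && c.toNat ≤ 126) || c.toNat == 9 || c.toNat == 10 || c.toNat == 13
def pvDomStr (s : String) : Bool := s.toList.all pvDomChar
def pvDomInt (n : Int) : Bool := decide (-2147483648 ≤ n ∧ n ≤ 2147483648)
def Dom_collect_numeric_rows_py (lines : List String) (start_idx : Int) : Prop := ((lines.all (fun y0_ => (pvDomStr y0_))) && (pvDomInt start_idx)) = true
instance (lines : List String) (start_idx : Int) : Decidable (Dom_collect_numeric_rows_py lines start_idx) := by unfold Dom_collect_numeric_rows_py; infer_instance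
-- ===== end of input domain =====

-- ===== PORT A =====
-- B changes: two-phase drop-then-take decomposition instead of A's flag-based loop with break/continue (alternative, same cost).
-- shared row builder: [part.strip() for part in line.split(",")]  (sep "," is nonempty, so split? is always `some`; getD [] is exact)
def pvRowOf (line : String) : List String :=
  ((PySem.Str.split? line ",").getD []).map PySem.Str.strip

-- literal transliteration of A's for-loop over lines[start_idx:] with rows accumulator, continue and break
def pvLoopA : List String → List (List String) → List (List String)
  | [], rows => rows
  | line :: rest, rows =>
    if (PySem.Str.strip line).isEmpty then
      (if rows.isEmpty then pvLoopA rest rows else rows)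
    else
      let parts := pvRowOf line
      if parts.isEmpty || !PySem.Str.strIsdigit (parts.headD "") then
        -- parts is never empty (split always returns ≥ 1 piece), so headD "" = parts[0] exactly
        (if rows.isEmpty then pvLoopA rest rows else rows)
      else pvLoopA rest (rows ++ [parts])

def collect_numeric_rows_py (lines : List String) (start_idx : Int) : List (List String) :=
  pvLoopA (PySem.List.slice lines (some start_idx) none) []

-- ===== PORT B =====
-- valid(line) = bool(line.strip()) and line.split(",")[0].strip().isdigit()
def pvValid (line : String) : Bool :=
  !(PySem.Str.strip line).isEmpty &&
    PySem.Str.strIsdigit (PySem.Str.strip (((PySem.Str.split? line ",").getD []).headD ""))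

-- while i < len(tail) and not valid(tail[i]): i += 1   (tail[i] with 0 <= i < len: getD is exact)
def pvFindStart (tail : List String) (i : Nat) : Nat :=
  if i < tail.length && !pvValid (tail.getD i "") then pvFindStart tail (i + 1) else i
termination_by tail.length - i
decreasing_by simp_all; omega

-- while j < len(tail) and valid(tail[j]): j += 1
def pvFindEnd (tail : List String) (j : Nat) : Nat :=
  if j < tail.length && pvValid (tail.getD j "") then pvFindEnd tail (j + 1) else j
termination_by tail.length - j
decreasing_by simp_all; omega

def collect_numeric_rows_py_alt (lines : List String) (start_idx : Int) : List (List String) :=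
  let tail := PySem.List.slice lines (some start_idx) none
  let i := pvFindStart tail 0
  let j := pvFindEnd tail i
  (PySem.List.slice tail (some (i : Int)) (some (j : Int))).map pvRowOf

-- ===== PRECONDITION & SPEC =====
def Spec_collect_numeric_rows_py (lines : List String) (start_idx : Int) (out : List (List String)) : Prop := out = collect_numeric_rows_py_alt lines start_idx
instance (lines : List String) (start_idx : Int) (out : List (List String)) : Decidable (Spec_collect_numeric_rows_py lines start_idx out) := by unfold Spec_collect_numeric_rows_py; infer_instance

-- ===== CLAIM (what is proved, stated in full; the proofs are below) =====
def Claim_equal_collect_numeric_rows_py : Prop := ∀ (lines : List String) (start_idx : Int), Dom_collect_numeric_rows_py lines start_idx → Spec_collect_numeric_rows_py lines start_idx (collect_numeric_rows_py lines start_idx)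

-- ===== LEMMAS AND PROOFS =====

-- proof-side reformulations of B's index loops as structural drop/take
def pvDropInvalid : List String → List String
  | [] => []
  | x :: xs => if !pvValid x then pvDropInvalid xs else x :: xs

def pvTakeValid : List String → List String
  | [] => []
  | x :: xs => if pvValid x then x :: pvTakeValid xs else []

-- A's step on one line, restated through B's predicate pvValid
theorem pvLoopA_cons (line : String) (rest : List String) (rows : List (List String)) :
    pvLoopA (line :: rest) rows =
      if pvValid line then pvLoopA rest (rows ++ [pvRowOf line])
      else if rows.isEmpty then pvLoopA rest rows else rows := by
  rcases h : (PySem.Str.split? line ",").getD [] with _ | ⟨x, xs⟩ <;>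
    simp only [pvLoopA, pvValid, pvRowOf, h] <;>
    rcases he : (PySem.Str.strip line).isEmpty <;>
    simp [he, PySem.Str.strip, PySem.Str.strIsdigit]
  · intro hd; exact absurd hd (by decide)
  · rcases hv : PySem.Chars.strIsdigit (PySem.Chars.strip x.toList) <;> simp [hv]

-- once rows is nonempty, A collects exactly the remaining valid prefix
theorem pvLoopA_nonempty (xs : List String) (rows : List (List String)) (h : rows ≠ []) :
    pvLoopA xs rows = rows ++ (pvTakeValid xs).map pvRowOf := by
  induction xs generalizing rows with
  | nil => simp [pvLoopA, pvTakeValid]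
  | cons x xs ih =>
    rw [pvLoopA_cons]
    rcases hv : pvValid x
    · simp [pvTakeValid, hv, h]
    · rw [ih _ (by simp)]
      simp [pvTakeValid, hv]

theorem pvLoopA_eq (xs : List String) :
    pvLoopA xs [] = (pvTakeValid (pvDropInvalid xs)).map pvRowOf := by
  induction xs with
  | nil => simp [pvLoopA, pvDropInvalid, pvTakeValid]
  | cons x xs ih =>
    rw [pvLoopA_cons]
    rcases hv : pvValid x
    · simpa [pvDropInvalid, hv] using ih
    · rw [pvLoopA_nonempty _ _ (by simp)]
      simp [pvDropInvalid, pvTakeValid, hv]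

-- B's first while-loop computes pvDropInvalid of the remaining suffix
theorem pvFindStart_spec (tail : List String) (i : Nat) (hi : i ≤ tail.length) :
    i ≤ pvFindStart tail i ∧ pvFindStart tail i ≤ tail.length ∧
      tail.drop (pvFindStart tail i) = pvDropInvalid (tail.drop i) := by
  induction hn : tail.length - i generalizing i with
  | zero =>
    have hlen : i = tail.length := by omega
    rw [pvFindStart]
    simp [hlen, pvDropInvalid]
  | succ n ih =>
    have hlt : i < tail.length := by omega
    rw [pvFindStart]
    have hdrop : tail.drop i = tail[i] :: tail.drop (i + 1) :=
      List.drop_eq_getElem_cons hlt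
    have hgetD : tail.getD i "" = tail[i] := by
      simp [List.getD_eq_getElem?_getD, List.getElem?_eq_getElem hlt]
    rcases hv : pvValid tail[i]
    · simp only [hlt, hgetD, hv, Bool.not_false, Bool.and_true, decide_eq_true_eq, if_pos trivial]
      obtain ⟨h1, h2, h3⟩ := ih (i + 1) (by omega) (by omega)
      refine ⟨by omega, h2, ?_⟩
      rw [h3, hdrop]
      simp [pvDropInvalid, hv]
    · simp only [hlt, hgetD, hv, Bool.not_true, Bool.and_false, Bool.false_eq_true, if_false]
      refine ⟨le_refl _, by omega, ?_⟩
      rw [hdrop]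
      simp [pvDropInvalid, hv]

-- B's second while-loop computes pvTakeValid of the remaining suffix
theorem pvFindEnd_spec (tail : List String) (j : Nat) (hj : j ≤ tail.length) :
    j ≤ pvFindEnd tail j ∧ pvFindEnd tail j ≤ tail.length ∧
      (tail.drop j).take (pvFindEnd tail j - j) = pvTakeValid (tail.drop j) := by
  induction hn : tail.length - j generalizing j with
  | zero =>
    have hlen : j = tail.length := by omega
    rw [pvFindEnd]
    simp [hlen, pvTakeValid]
  | succ n ih =>
    have hlt : j < tail.length := by omega
    rw [pvFindEnd]
    have hdrop : tail.drop j = tail[j] :: tail.drop (j + 1) :=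
      List.drop_eq_getElem_cons hlt
    have hgetD : tail.getD j "" = tail[j] := by
      simp [List.getD_eq_getElem?_getD, List.getElem?_eq_getElem hlt]
    rcases hv : pvValid tail[j]
    · simp only [hlt, hgetD, hv, Bool.and_false, Bool.false_eq_true, if_false]
      refine ⟨le_refl _, by omega, ?_⟩
      rw [hdrop]
      simp [pvTakeValid, hv]
    · simp only [hlt, hgetD, hv, Bool.and_true, decide_eq_true_eq, if_pos trivial]
      obtain ⟨h1, h2, h3⟩ := ih (j + 1) (by omega) (by omega)
      refine ⟨by omega, h2, ?_⟩
      rw [hdrop]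
      have : pvFindEnd tail (j + 1) - j = (pvFindEnd tail (j + 1) - (j + 1)) + 1 := by omega
      rw [this, List.take_succ_cons, h3]
      simp [pvTakeValid, hv]

theorem alt_eq (lines : List String) (start_idx : Int) :
    collect_numeric_rows_py_alt lines start_idx =
      (pvTakeValid (pvDropInvalid (PySem.List.slice lines (some start_idx) none))).map pvRowOf := by
  unfold collect_numeric_rows_py_alt
  set tail := PySem.List.slice lines (some start_idx) none with htail
  show (PySem.List.slice tail (some ((pvFindStart tail 0 : Nat) : Int))
      (some ((pvFindEnd tail (pvFindStart tail 0) : Nat) : Int))).map pvRowOf = _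
  obtain ⟨hi0, hi1, hi2⟩ := pvFindStart_spec tail 0 (by omega)
  obtain ⟨hj0, hj1, hj2⟩ := pvFindEnd_spec tail (pvFindStart tail 0) hi1
  rw [PySem.List.slice_natCast, hj2, hi2]
  simp

-- ===== VERDICT (by name: the statement is the Claim_ definition above) =====
theorem collect_numeric_rows_py_spec : Claim_equal_collect_numeric_rows_py := by
  intro lines start_idx _
  unfold Spec_collect_numeric_rows_py collect_numeric_rows_py
  rw [alt_eq, pvLoopA_eq]
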